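-- pv_equiv track=rewrite | github.com/msrosenberg/ImpactFactor | Impact_Funcs.py | calculate_hj_indices
-- ===== SOURCE A (Python) =====
-- def calculate_hj_indices(total_pubs: int, h: int, sorted_citations: list) -> list:
--     if total_pubs < 2 * h - 1:
--         j = total_pubs - h
--     else:
--         j = h - 1
--     hj_index = [h**2]
--     for i in range(1, j+1):
--         hj_index.append(hj_index[i-1] + (h-i)*(sorted_citations[h-i-1] - sorted_citations[h-i])
--                         + sorted_citations[h+i-1])
--     return hj_index
-- ===== SOURCE B (Python) =====
-- def calculate_hj_indices(total_pubs: int, h: int, sorted_citations: list) -> list: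
--     if total_pubs < 2 * h - 1:
--         j = total_pubs - h
--     else:
--         j = h - 1
--     if j < 1:
--         return [h ** 2]
--     prefix = [0]
--     for c in sorted_citations:
--         prefix.append(prefix[-1] + c)
--     base = h ** 2 - (h - 1) * sorted_citations[h - 1]
--     return [h ** 2] + [
--         base + (h - i) * sorted_citations[h - i - 1]
--         + (prefix[h - 1] - prefix[h - i]) + (prefix[h + i] - prefix[h])
--         for i in range(1, j + 1)
--     ]
-- ===== Notes on version B (the rewrite author's own statement) =====
-- stated objective: alternative
-- what changed: Replaces A's first-order recurrence (each element built from the previous list entry) by a prefix-sum table plus a telescoped closed form computing every element independently.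
import Mathlib
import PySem

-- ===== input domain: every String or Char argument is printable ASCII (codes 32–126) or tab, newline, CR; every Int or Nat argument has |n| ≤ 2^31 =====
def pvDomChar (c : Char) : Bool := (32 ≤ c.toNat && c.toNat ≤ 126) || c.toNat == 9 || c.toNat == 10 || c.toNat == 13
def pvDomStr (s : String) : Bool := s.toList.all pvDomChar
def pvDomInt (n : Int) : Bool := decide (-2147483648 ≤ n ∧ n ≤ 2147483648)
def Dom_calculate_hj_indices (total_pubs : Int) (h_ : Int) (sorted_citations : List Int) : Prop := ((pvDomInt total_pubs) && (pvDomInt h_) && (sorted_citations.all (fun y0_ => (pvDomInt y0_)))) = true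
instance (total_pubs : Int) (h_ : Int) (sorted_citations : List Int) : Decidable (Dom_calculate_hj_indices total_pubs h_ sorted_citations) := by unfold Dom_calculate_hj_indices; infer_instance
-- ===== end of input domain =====

-- B replaces A's element-by-element recurrence with a prefix-sum table and an independent
-- closed form per element (alternative decomposition; same asymptotic cost).

-- ===== PORT A =====
-- All list accesses use pyGet? with .getD 0; under Pre_ every access is in range, so the
-- default is never taken (where Python would raise IndexError, the input is outside Pre_).
-- Loop body of A, as a helper (hj.append(hj[i-1] + (h-i)*(c[h-i-1]-c[h-i]) + c[h+i-1])).
def pvStepA (h_ : Int) (cs : List Int) (hj : List Int) (i : Int) : List Int :=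
  hj ++ [((PySem.List.pyGet? hj (i - 1)).getD 0)
    + (h_ - i) * (((PySem.List.pyGet? cs (h_ - i - 1)).getD 0)
                  - ((PySem.List.pyGet? cs (h_ - i)).getD 0))
    + ((PySem.List.pyGet? cs (h_ + i - 1)).getD 0)]

def calculate_hj_indices (total_pubs : Int) (h_ : Int) (sorted_citations : List Int) : List Int :=
  let j : Int := if total_pubs < 2 * h_ - 1 then total_pubs - h_ else h_ - 1
  (PySem.List.pyRange 1 (j + 1) 1).foldl (pvStepA h_ sorted_citations) [h_ ^ 2]

-- ===== PORT B =====
-- Comprehension body of B: base + (h-i)*c[h-i-1] + (P[h-1]-P[h-i]) + (P[h+i]-P[h]).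
def pvElemB (h_ : Int) (cs pfx : List Int) (base i : Int) : Int :=
  base + (h_ - i) * ((PySem.List.pyGet? cs (h_ - i - 1)).getD 0)
    + (((PySem.List.pyGet? pfx (h_ - 1)).getD 0) - ((PySem.List.pyGet? pfx (h_ - i)).getD 0))
    + (((PySem.List.pyGet? pfx (h_ + i)).getD 0) - ((PySem.List.pyGet? pfx h_).getD 0))

def calculate_hj_indices_alt (total_pubs : Int) (h_ : Int) (sorted_citations : List Int) : List Int :=
  let j : Int := if total_pubs < 2 * h_ - 1 then total_pubs - h_ else h_ - 1
  if j < 1 then [h_ ^ 2]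
  else
    let pfx := sorted_citations.foldl
      (fun acc c => acc ++ [((PySem.List.pyGet? acc (-1)).getD 0) + c]) [(0 : Int)]
    let base := h_ ^ 2 - (h_ - 1) * ((PySem.List.pyGet? sorted_citations (h_ - 1)).getD 0)
    [h_ ^ 2] ++ (PySem.List.pyRange 1 (j + 1) 1).map (pvElemB h_ sorted_citations pfx base)

-- ===== PRECONDITION & SPEC =====
-- Pre_ holds exactly when Python A returns: either the loop is empty (j < 1), or the largest
-- accessed index h+j-1 is in range (all other accessed indices are then also in range);
-- otherwise A raises IndexError (and B raises too).
def Pre_calculate_hj_indices (total_pubs : Int) (h_ : Int) (sorted_citations : List Int) : Prop :=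
  (if total_pubs < 2 * h_ - 1 then total_pubs - h_ else h_ - 1) < 1 ∨
  h_ + (if total_pubs < 2 * h_ - 1 then total_pubs - h_ else h_ - 1) ≤ sorted_citations.length
instance (total_pubs : Int) (h_ : Int) (sorted_citations : List Int) : Decidable (Pre_calculate_hj_indices total_pubs h_ sorted_citations) := by unfold Pre_calculate_hj_indices; infer_instance

def pvWitness_calculate_hj_indices : Int × Int × List Int := (6, 3, [9, 7, 5, 3, 2, 1])

def Spec_calculate_hj_indices (total_pubs : Int) (h_ : Int) (sorted_citations : List Int) (out : List Int) : Prop := out = calculate_hj_indices_alt total_pubs h_ sorted_citations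
instance (total_pubs : Int) (h_ : Int) (sorted_citations : List Int) (out : List Int) : Decidable (Spec_calculate_hj_indices total_pubs h_ sorted_citations out) := by unfold Spec_calculate_hj_indices; infer_instance

-- ===== CLAIM (what is proved, stated in full; the proofs are below) =====
def Claim_equal_calculate_hj_indices : Prop := ∀ (total_pubs : Int) (h_ : Int) (sorted_citations : List Int), Dom_calculate_hj_indices total_pubs h_ sorted_citations → Pre_calculate_hj_indices total_pubs h_ sorted_citations → Spec_calculate_hj_indices total_pubs h_ sorted_citations (calculate_hj_indices total_pubs h_ sorted_citations)

-- ===== LEMMAS AND PROOFS =====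

-- prefix sums of the first m citations
def pvS (cs : List Int) (m : Nat) : Int := (cs.take m).sum

-- the common reference sequence: value of hj_index[k]
def pvG (hN : Nat) (cs : List Int) : Nat → Int
  | 0 => (hN : Int) ^ 2
  | k + 1 => pvG hN cs k
      + ((hN : Int) - (k + 1)) * (cs.getD (hN - k - 2) 0 - cs.getD (hN - k - 1) 0)
      + cs.getD (hN + k) 0

theorem pvGetD0 (xs : List Int) (i : Int) (hi : 0 ≤ i) :
    (PySem.List.pyGet? xs i).getD 0 = xs.getD i.toNat 0 := by
  rw [PySem.List.pyGet?_of_nonneg xs hi]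
  simp [List.getD_eq_getElem?_getD]

theorem pvS_succ (cs : List Int) (m : Nat) (hm : m < cs.length) :
    pvS cs (m + 1) = pvS cs m + cs.getD m 0 := by
  simp [pvS, List.sum_take_succ cs m hm, List.getD_eq_getElem?_getD,
    List.getElem?_eq_getElem hm]

theorem pv_foldA (hN : Nat) (cs : List Int) (n : Nat) (hh : n + 1 ≤ hN)
    (hl : hN + n ≤ cs.length) :
    (List.range n).foldl (fun hj (k : Nat) => pvStepA (hN : Int) cs hj (1 + (k : Int))) [(hN : Int) ^ 2]
      = (List.range (n + 1)).map (pvG hN cs) := by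
  induction n with
  | zero => simp [pvG]
  | succ n ih =>
    rw [List.range_succ, List.foldl_append]
    rw [ih (by omega) (by omega)]
    show pvStepA _ _ _ _ = _
    unfold pvStepA
    have e1 : (1 + (n : Int)) - 1 = ((n : Nat) : Int) := by ring
    rw [e1, PySem.List.pyGet?_natCast]
    have hget : ((List.range (n + 1)).map (pvG hN cs))[n]? = some (pvG hN cs n) := by
      simp
    rw [hget]
    rw [pvGetD0 _ _ (by omega), pvGetD0 _ _ (by omega),
        pvGetD0 _ _ (by omega)]
    have e2 : ((hN : Int) - (1 + (n : Int)) - 1).toNat = hN - n - 2 := by omega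
    have e3 : ((hN : Int) - (1 + (n : Int))).toNat = hN - n - 1 := by omega
    have e4 : ((hN : Int) + (1 + (n : Int)) - 1).toNat = hN + n := by omega
    rw [e2, e3, e4, List.range_succ (n := n + 1), List.map_append]
    simp only [Option.getD_some, List.map_cons, List.map_nil, List.append_cancel_left_eq]
    have : pvG hN cs (n + 1) = pvG hN cs n
        + ((hN : Int) - ((n : Int) + 1)) * (cs.getD (hN - n - 2) 0 - cs.getD (hN - n - 1) 0)
        + cs.getD (hN + n) 0 := by
      simp [pvG]
    rw [this]
    ring_nf

theorem pv_pfx_gen (cs : List Int) (acc : List Int) (t : Int)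
    (ht : PySem.List.pyGet? acc (-1) = some t) :
    cs.foldl (fun a c => a ++ [((PySem.List.pyGet? a (-1)).getD 0) + c]) acc
      = acc ++ (List.range cs.length).map (fun m => t + (cs.take (m + 1)).sum) := by
  induction cs generalizing acc t with
  | nil => simp
  | cons c cs ih =>
    simp only [List.foldl_cons, ht, Option.getD_some]
    rw [ih (acc ++ [t + c]) (t + c) (PySem.List.pyGet?_neg_one_append_singleton acc (t + c))]
    rw [List.append_assoc]
    congr 1
    rw [List.length_cons, List.range_succ_eq_map, List.map_cons, List.map_map]
    simp [Function.comp, Nat.succ_eq_add_one, add_assoc]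

theorem pv_pfx_get (cs : List Int) (m : Nat) (hm : m ≤ cs.length) :
    (PySem.List.pyGet?
      (cs.foldl (fun a c => a ++ [((PySem.List.pyGet? a (-1)).getD 0) + c]) [(0 : Int)])
      (m : Int)).getD 0 = pvS cs m := by
  rw [pv_pfx_gen cs [(0 : Int)] 0 (by simp [PySem.List.pyGet?_neg_one])]
  rw [PySem.List.pyGet?_natCast]
  cases m with
  | zero => simp [pvS]
  | succ m =>
    have hm' : m < cs.length := by omega
    simp [hm', pvS]

theorem pv_cf_eq_g (hN : Nat) (cs : List Int) (k : Nat) (hk : k + 2 ≤ hN)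
    (hl : hN + k + 1 ≤ cs.length) :
    (hN : Int) ^ 2 - ((hN : Int) - 1) * cs.getD (hN - 1) 0
      + ((hN : Int) - (1 + (k : Int))) * cs.getD (hN - k - 2) 0
      + (pvS cs (hN - 1) - pvS cs (hN - k - 1))
      + (pvS cs (hN + k + 1) - pvS cs hN)
      = pvG hN cs (k + 1) := by
  induction k with
  | zero =>
    have hs : pvS cs (hN + 0 + 1) = pvS cs hN + cs.getD hN 0 := by
      have := pvS_succ cs hN (by omega); simpa using this
    rw [hs]
    simp only [pvG, Nat.sub_zero, Nat.add_zero]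
    push_cast
    ring
  | succ k ih =>
    have ih' := ih (by omega) (by omega)
    have e1 : hN - (k + 1) - 2 = hN - k - 3 := by omega
    have e2 : hN - (k + 1) - 1 = hN - k - 2 := by omega
    have e3 : hN + (k + 1) + 1 = hN + k + 2 := by omega
    have hs1 : pvS cs (hN - k - 1) = pvS cs (hN - k - 2) + cs.getD (hN - k - 2) 0 := by
      have := pvS_succ cs (hN - k - 2) (by omega)
      have e : hN - k - 2 + 1 = hN - k - 1 := by omega
      rwa [e] at this
    have hs2 : pvS cs (hN + k + 2) = pvS cs (hN + k + 1) + cs.getD (hN + k + 1) 0 := by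
      have := pvS_succ cs (hN + k + 1) (by omega); simpa using this
    have gstep : pvG hN cs (k + 1 + 1) = pvG hN cs (k + 1)
        + ((hN : Int) - ((k : Int) + 2)) * (cs.getD (hN - (k + 1) - 2) 0 - cs.getD (hN - (k + 1) - 1) 0)
        + cs.getD (hN + (k + 1)) 0 := by
      simp only [pvG]
      push_cast
      ring
    rw [e1, e2, e3, hs2, gstep, e1, e2, show hN + (k + 1) = hN + k + 1 by omega, ← ih', hs1]
    push_cast
    ring

-- ===== VERDICT (by name: the statement is the Claim_ definition above) =====
theorem calculate_hj_indices_spec : Claim_equal_calculate_hj_indices := by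
  intro tp h cs _dom pre
  unfold Pre_calculate_hj_indices at pre
  unfold Spec_calculate_hj_indices
  simp only [calculate_hj_indices, calculate_hj_indices_alt]
  by_cases hj1 : (if tp < 2 * h - 1 then tp - h else h - 1) < 1
  · rw [if_pos hj1, PySem.List.pyRange_one]
    have h0 : ((if tp < 2 * h - 1 then tp - h else h - 1) + 1 - 1).toNat = 0 := by
      split at hj1 <;> omega
    rw [h0]
    simp
  · rw [if_neg hj1]
    set j := (if tp < 2 * h - 1 then tp - h else h - 1) with hjdef
    have hjh : j ≤ h - 1 := by rw [hjdef]; split <;> omega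
    have hpre : h + j ≤ (cs.length : Int) := by
      rcases pre with p | p
      · omega
      · exact p
    have hh2 : 2 ≤ h := by omega
    have hE : h = ((h.toNat : Nat) : Int) := by omega
    have hjE : j = ((j.toNat : Nat) : Int) := by omega
    set hN := h.toNat
    set n := j.toNat
    have hbound1 : n + 1 ≤ hN := by omega
    have hbound2 : hN + n ≤ cs.length := by omega
    rw [hE, hjE]
    rw [PySem.List.pyRange_one]
    have hn : (((n : Int)) + 1 - 1).toNat = n := by omega
    rw [hn, List.foldl_map]
    rw [pv_foldA hN cs n hbound1 hbound2]
    rw [List.range_succ_eq_map, List.map_cons]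
    have hg0 : pvG hN cs 0 = (hN : Int) ^ 2 := rfl
    rw [hg0]
    show _ = [((hN : Nat) : Int) ^ 2] ++ _
    rw [List.singleton_append, List.map_map]
    congr 1
    rw [List.map_map]
    apply List.map_congr_left
    intro k hk
    rw [List.mem_range] at hk
    simp only [Function.comp_apply, pvElemB]
    have hk2 : k + 2 ≤ hN := by omega
    have hl : hN + k + 1 ≤ cs.length := by omega
    -- citation accesses
    rw [pvGetD0 cs _ (by omega), pvGetD0 cs _ (by omega)]
    have ec1 : (((hN : Int)) - 1).toNat = hN - 1 := by omega
    have ec2 : (((hN : Int)) - (1 + (k : Int)) - 1).toNat = hN - k - 2 := by omega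
    rw [ec1, ec2]
    -- prefix accesses
    have ep1 : ((hN : Int)) - 1 = (((hN - 1 : Nat)) : Int) := by omega
    have ep2 : ((hN : Int)) - (1 + (k : Int)) = (((hN - k - 1 : Nat)) : Int) := by omega
    have ep3 : ((hN : Int)) + (1 + (k : Int)) = (((hN + k + 1 : Nat)) : Int) := by omega
    rw [ep1, ep2, ep3]
    rw [pv_pfx_get cs (hN - 1) (by omega), pv_pfx_get cs (hN - k - 1) (by omega),
        pv_pfx_get cs (hN + k + 1) (by omega), pv_pfx_get cs hN (by omega)]
    rw [← pv_cf_eq_g hN cs k hk2 hl]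
    have c1 : ((hN - 1 : Nat) : Int) = (hN : Int) - 1 := by omega
    have c2 : ((hN - k - 1 : Nat) : Int) = (hN : Int) - (k : Int) - 1 := by omega
    rw [c1, c2]
    ring
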